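-- pv_equiv track=rewrite | github.com/VinhAlth/Pumpkin_AIC_2024 | utils/shot_clustering.py | group_images
-- ===== SOURCE A (Python) =====
-- def group_images(duplicates):
--     visited = set()
--     groups = []
--
--     def dfs(image, group):
--         if image not in visited:  # Ensure image is a string
--             visited.add(image)
--             group.add(image)
--             for dup_info in duplicates.get(image, []):
--                 dup = dup_info[0]  # Extracting the duplicate file name
--                 if isinstance(dup, str):  # Ensure dup is a string
--                     dfs(dup, group)
--
--     for image in duplicates:
--         if image not in visited:  # Ensure image is a string
--             group = set()
--             dfs(image, group)
--             groups.append(sorted(group))  # Sorting for consistent output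
--
--     return groups
-- ===== SOURCE B (Python) =====
-- def group_images(duplicates):
--     visited = set()
--     groups = []
--     for image in duplicates:
--         if image in visited:
--             continue
--         group = set()
--         stack = [image]
--         while stack:
--             node = stack.pop()
--             if node in visited:
--                 continue
--             visited.add(node)
--             group.add(node)
--             for dup_info in reversed(duplicates.get(node, [])):
--                 dup = dup_info[0]
--                 if isinstance(dup, str):
--                     stack.append(dup)
--         groups.append(sorted(group))
--     return groups
-- ===== Notes on version B (the rewrite author's own statement) =====
-- stated objective: alternative
-- what changed: The recursive nested dfs helper is replaced by an iterative depth-first search with an explicit stack (pop a node, skip if visited, else mark it and push the duplicate names in reverse), removing the recursion entirely.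
import Mathlib
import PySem

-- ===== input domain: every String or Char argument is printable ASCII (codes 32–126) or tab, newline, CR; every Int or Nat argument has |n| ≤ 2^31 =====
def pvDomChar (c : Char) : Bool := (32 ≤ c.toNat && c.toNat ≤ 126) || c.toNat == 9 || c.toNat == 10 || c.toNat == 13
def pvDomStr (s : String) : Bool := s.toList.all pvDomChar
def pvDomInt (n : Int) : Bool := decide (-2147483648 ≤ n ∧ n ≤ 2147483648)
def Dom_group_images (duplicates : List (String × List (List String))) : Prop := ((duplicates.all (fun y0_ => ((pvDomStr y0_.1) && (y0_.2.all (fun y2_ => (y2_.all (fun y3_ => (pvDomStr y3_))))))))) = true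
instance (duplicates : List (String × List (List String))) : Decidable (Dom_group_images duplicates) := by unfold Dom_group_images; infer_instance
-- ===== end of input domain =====

-- B replaces A's recursive DFS over duplicate links by an iterative DFS with an explicit stack
-- (pop a node, mark it, push its duplicate names in reverse), visiting nodes in the same order.


-- ===== PORT A =====
-- the Python dict argument, as a PySem.Dict (both ports and Pre_ read it through this)
def pvDict (duplicates : List (String × List (List String))) : PySem.Dict String (List (List String)) :=
  PySem.Dict.ofList duplicates

-- a finite superset of every node the traversal can touch: the keys plus every extracted duplicate name
def pvNodes (d : PySem.Dict String (List (List String))) : List String :=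
  d.keys ++ d.values.flatten.filterMap (fun l => PySem.List.pyGet? l 0)

-- number of not-yet-visited nodes (termination measure for B's stack loop; fuel bound for A's dfs)
def pvUnvisited (d : PySem.Dict String (List (List String))) (v : PySem.Set String) : Nat :=
  ((pvNodes d).filter (fun x => !(v.contains x))).length

-- two generic filter-length facts used by the termination proof of pvStackLoop
theorem pvFilterLenLe {α : Type} (l : List α) (p q : α → Bool) (h : ∀ a, p a → q a) :
    (l.filter p).length ≤ (l.filter q).length := by
  induction l with
  | nil => simp
  | cons a t ih =>
    by_cases hp : p a
    · simp [hp, h a hp]; omega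
    · by_cases hq : q a <;> simp [hp, hq] <;> omega

theorem pvFilterLenLt {α : Type} (l : List α) (p q : α → Bool) (h : ∀ a, p a → q a)
    (x : α) (hx : x ∈ l) (hq : q x) (hp : ¬ p x) :
    (l.filter p).length < (l.filter q).length := by
  induction l with
  | nil => simp at hx
  | cons a t ih =>
    rcases List.mem_cons.mp hx with rfl | hx
    · simp [hp, hq]
      have := pvFilterLenLe t p q h
      omega
    · by_cases hpa : p a
      · simp [hpa, h a hpa]; have := ih hx; omega
      · by_cases hqa : q a <;> simp [hpa, hqa]
        · have := ih hx; omega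
        · exact ih hx

theorem pvContains_eq (v : PySem.Set String) (x : String) :
    PySem.Set.contains v x = decide (x ∈ v) := by
  by_cases h : x ∈ v
  · simp only [h, decide_true]
    exact (PySem.Set.contains_iff v x).mpr h
  · simp only [h, decide_false]
    rcases hc : PySem.Set.contains v x with _ | _
    · rfl
    · exact absurd ((PySem.Set.contains_iff v x).mp hc) h

theorem pvUnvisited_add_lt (d : PySem.Dict String (List (List String))) (v : PySem.Set String) (x : String)
    (hx : x ∈ pvNodes d) (hv : ¬ x ∈ v) :
    pvUnvisited d (PySem.Set.add v x) < pvUnvisited d v := by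
  apply pvFilterLenLt _ _ _ _ x hx
  · simp [hv]
  · simp [PySem.Set.mem_add]
  · intro a ha
    simp only [pvContains_eq, Bool.not_eq_true', decide_eq_false_iff_not,
      PySem.Set.mem_add] at ha ⊢
    tauto

theorem pvUnvisited_add_eq (d : PySem.Dict String (List (List String))) (v : PySem.Set String) (x : String)
    (hx : ¬ x ∈ pvNodes d) :
    pvUnvisited d (PySem.Set.add v x) = pvUnvisited d v := by
  unfold pvUnvisited
  congr 1
  apply List.filter_congr
  intro a ha
  have hax : a ≠ x := fun h => hx (h ▸ ha)
  simp [PySem.Set.mem_add, hax]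

theorem pvGetD_eq_nil_of_not_mem_nodes (d : PySem.Dict String (List (List String))) (x : String)
    (hx : ¬ x ∈ pvNodes d) : d.getD x [] = [] := by
  apply PySem.Dict.getD_of_not_contains
  rcases h : d.contains x with _ | _
  · rfl
  · exact absurd ((PySem.Dict.contains_iff_mem_keys d x).mp h)
      (fun hm => hx (by simp [pvNodes, hm]))

-- fuel-bounded recursive DFS: a literal transliteration of A's nested `dfs`.
-- The fuel only makes the recursion structural; group_images calls it with fuel
-- strictly greater than pvUnvisited, which is never exhausted (pvDfs_eq_stack below).
mutual
def pvDfsA (d : PySem.Dict String (List (List String))) :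
    Nat → String → PySem.Set String → PySem.Set String → PySem.Set String × PySem.Set String
  | 0, _, v, g => (v, g)  -- fuel guard, never reached from group_images
  | Nat.succ f, image, v, g =>
    if v.contains image then (v, g)  -- `if image not in visited`
    else
      -- visited.add(image); group.add(image); then the for-loop over duplicates.get(image, [])
      pvDfsListA d f (d.getD image []) (PySem.Set.add v image) (PySem.Set.add g image)
termination_by f _ _ _ => (f, 0)

def pvDfsListA (d : PySem.Dict String (List (List String))) :
    Nat → List (List String) → PySem.Set String → PySem.Set String → PySem.Set String × PySem.Set String
  | _, [], v, g => (v, g)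
  | f, n :: rest, v, g =>
    match PySem.List.pyGet? n 0 with  -- dup = dup_info[0]
    | none => pvDfsListA d f rest v g  -- Python raises IndexError here; such inputs are excluded by Pre_
    | some dup =>
      -- isinstance(dup, str) is identically true on this argument type
      let r := pvDfsA d f dup v g
      pvDfsListA d f rest r.1 r.2
termination_by f ns _ _ => (f, ns.length + 1)
end

def group_images (duplicates : List (String × List (List String))) : List (List String) :=
  let d := pvDict duplicates
  (d.keys.foldl
    (fun (st : PySem.Set String × List (List String)) image =>
      if st.1.contains image then st  -- `if image not in visited`
      else
        let r := pvDfsA d ((pvNodes d).length + 1) image st.1 PySem.Set.empty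
        (r.1, st.2 ++ [PySem.List.sorted r.2 (fun x => x) false]))  -- groups.append(sorted(group))
    (PySem.Set.empty, [])).2

-- ===== PORT B =====
-- iterative DFS with an explicit stack (top of the stack = head of the list)
def pvStackLoop (d : PySem.Dict String (List (List String))) :
    List String → PySem.Set String → PySem.Set String → PySem.Set String × PySem.Set String
  | [], v, g => (v, g)
  | node :: rest, v, g =>
    if v.contains node then pvStackLoop d rest v g  -- `if node in visited: continue`
    else
      -- visited.add(node); group.add(node);
      -- for dup_info in reversed(duplicates.get(node, [])): stack.append(dup_info[0])
      -- (an empty dup_info raises IndexError in Python; excluded by Pre_, skipped here;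
      --  isinstance(dup, str) is identically true on this argument type)
      pvStackLoop d
        (((d.getD node []).reverse.filterMap (fun l => PySem.List.pyGet? l 0)).foldl
          (fun st x => x :: st) rest)
        (PySem.Set.add v node) (PySem.Set.add g node)
termination_by stack v _ => (pvUnvisited d v, stack.length)
decreasing_by
  · exact Prod.Lex.right _ (by simp)
  · rename_i hvis
    by_cases hn : node ∈ pvNodes d
    · exact Prod.Lex.left _ _ (pvUnvisited_add_lt d v node hn (by simpa using hvis))
    · have h1 : d.getD node [] = [] := pvGetD_eq_nil_of_not_mem_nodes d node hn
      have h2 : pvUnvisited d (PySem.Set.add v node) = pvUnvisited d v := pvUnvisited_add_eq d v node hn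
      rw [h1, h2]
      exact Prod.Lex.right _ (by simp)


def group_images_alt (duplicates : List (String × List (List String))) : List (List String) :=
  let d := pvDict duplicates
  (d.keys.foldl
    (fun (st : PySem.Set String × List (List String)) image =>
      if st.1.contains image then st
      else
        let r := pvStackLoop d [image] st.1 PySem.Set.empty
        (r.1, st.2 ++ [PySem.List.sorted r.2 (fun x => x) false]))
    (PySem.Set.empty, [])).2

-- ===== PRECONDITION & SPEC =====
-- Pre_ excludes exactly the inputs on which A raises IndexError: a dict one of whose
-- values contains a length-0 duplicate-info list (every key gets visited, so dup_info[0]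
-- is evaluated for each such list).
def Pre_group_images (duplicates : List (String × List (List String))) : Prop :=
  ∀ vs ∈ (pvDict duplicates).values, ∀ l ∈ vs, l ≠ []
instance (duplicates : List (String × List (List String))) : Decidable (Pre_group_images duplicates) := by unfold Pre_group_images; infer_instance

def pvWitness_group_images : (List (String × List (List String))) :=
  [("a", [["b"], ["c", "a"]]), ("b", []), ("d", [["d"]])]

def Spec_group_images (duplicates : List (String × List (List String))) (out : List (List String)) : Prop := out = group_images_alt duplicates
instance (duplicates : List (String × List (List String))) (out : List (List String)) : Decidable (Spec_group_images duplicates out) := by unfold Spec_group_images; infer_instance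

-- ===== CLAIM (what is proved, stated in full; the proofs are below) =====
def Claim_equal_group_images : Prop := ∀ (duplicates : List (String × List (List String))), Dom_group_images duplicates → Pre_group_images duplicates → Spec_group_images duplicates (group_images duplicates)

-- ===== LEMMAS AND PROOFS =====

theorem pvUnvisited_add_le (d : PySem.Dict String (List (List String))) (v : PySem.Set String) (x : String) :
    pvUnvisited d (PySem.Set.add v x) ≤ pvUnvisited d v := by
  apply pvFilterLenLe
  intro a ha
  simp only [pvContains_eq, Bool.not_eq_true', decide_eq_false_iff_not,
    PySem.Set.mem_add] at ha ⊢
  tauto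

-- every extracted duplicate name is in pvNodes
theorem pvHead_mem_nodes (d : PySem.Dict String (List (List String))) (image : String)
    (l : List String) (hl : l ∈ d.getD image []) (dup : String)
    (hdup : PySem.List.pyGet? l 0 = some dup) : dup ∈ pvNodes d := by
  rcases h : d.get? image with _ | vs
  · rw [PySem.Dict.getD_of_get?_eq_none _ _ h] at hl
    simp at hl
  · rw [PySem.Dict.getD_of_get?_eq_some _ _ h] at hl
    have hvs : vs ∈ d.values := by
      have := PySem.Dict.mem_items_of_get?_eq_some d h
      simp only [PySem.Dict.values]
      exact List.mem_map.mpr ⟨(image, vs), this, rfl⟩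
    have : l ∈ d.values.flatten := List.mem_flatten.mpr ⟨vs, hvs, hl⟩
    simp only [pvNodes, List.mem_append]
    exact Or.inr (List.mem_filterMap.mpr ⟨l, this, hdup⟩)

-- `stack.append` loop: pushing a list one element at a time prepends its reverse
theorem pvPush_eq (xs : List String) (st : List String) :
    xs.foldl (fun st x => x :: st) st = xs.reverse ++ st :=
  List.foldl_flip_cons_eq_append'

-- the visited set of A's dfs only shrinks the unvisited count
theorem pvDfs_mono (d : PySem.Dict String (List (List String))) (f : Nat) :
    (∀ image v g, pvUnvisited d (pvDfsA d f image v g).1 ≤ pvUnvisited d v) ∧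
    (∀ ns v g, pvUnvisited d (pvDfsListA d f ns v g).1 ≤ pvUnvisited d v) := by
  induction f with
  | zero =>
    have hdfs : ∀ image v g, pvUnvisited d (pvDfsA d 0 image v g).1 ≤ pvUnvisited d v := by
      intro image v g; simp [pvDfsA]
    refine ⟨hdfs, ?_⟩
    intro ns
    induction ns with
    | nil => intro v g; simp [pvDfsListA]
    | cons n rest ih =>
      intro v g
      rcases h : PySem.List.pyGet? n 0 with _ | dup
      · simpa [pvDfsListA, h] using ih v g
      · have e : pvDfsListA d 0 (n :: rest) v g
            = pvDfsListA d 0 rest (pvDfsA d 0 dup v g).1 (pvDfsA d 0 dup v g).2 := by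
          simp [pvDfsListA, h]
        rw [e]
        exact le_trans (ih _ _) (hdfs dup v g)
  | succ f ih =>
    have hdfs : ∀ image v g, pvUnvisited d (pvDfsA d (f + 1) image v g).1 ≤ pvUnvisited d v := by
      intro image v g
      by_cases hm : image ∈ v
      · simp [pvDfsA, hm]
      · have e : pvDfsA d (f + 1) image v g
            = pvDfsListA d f (d.getD image []) (PySem.Set.add v image) (PySem.Set.add g image) := by
          simp [pvDfsA, hm]
        rw [e]
        exact le_trans (ih.2 _ _ _) (pvUnvisited_add_le d v image)
    refine ⟨hdfs, ?_⟩
    intro ns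
    induction ns with
    | nil => intro v g; simp [pvDfsListA]
    | cons n rest ihn =>
      intro v g
      rcases h : PySem.List.pyGet? n 0 with _ | dup
      · simpa [pvDfsListA, h] using ihn v g
      · have e : pvDfsListA d (f + 1) (n :: rest) v g
            = pvDfsListA d (f + 1) rest (pvDfsA d (f + 1) dup v g).1 (pvDfsA d (f + 1) dup v g).2 := by
          simp [pvDfsListA, h]
        rw [e]
        exact le_trans (ihn _ _) (hdfs dup v g)

-- the simulation, list form: processing the extracted names of ns on top of the stack
-- equals running A's inner for-loop and continuing with the rest of the stack
theorem pvSim_list (d : PySem.Dict String (List (List String))) (f : Nat)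
    (hdfs : ∀ image v g s, pvUnvisited d v ≤ f → (image ∈ pvNodes d ∨ pvUnvisited d v < f) →
      pvStackLoop d (image :: s) v g
        = pvStackLoop d s (pvDfsA d f image v g).1 (pvDfsA d f image v g).2) :
    ∀ ns v g s, pvUnvisited d v ≤ f →
      (∀ l ∈ ns, ∀ dup, PySem.List.pyGet? l 0 = some dup → dup ∈ pvNodes d) →
      pvStackLoop d (ns.filterMap (fun l => PySem.List.pyGet? l 0) ++ s) v g
        = pvStackLoop d s (pvDfsListA d f ns v g).1 (pvDfsListA d f ns v g).2 := by
  intro ns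
  induction ns with
  | nil => intro v g s h1 h2; simp [pvDfsListA]
  | cons n rest ih =>
    intro v g s h1 h2
    rcases h : PySem.List.pyGet? n 0 with _ | dup
    · have e : pvDfsListA d f (n :: rest) v g = pvDfsListA d f rest v g := by
        simp [pvDfsListA, h]
      rw [e]
      simpa [List.filterMap_cons, h] using
        ih v g s h1 (fun l hl => h2 l (List.mem_cons_of_mem _ hl))
    · have hdup : dup ∈ pvNodes d := h2 n List.mem_cons_self dup h
      have e : pvDfsListA d f (n :: rest) v g
          = pvDfsListA d f rest (pvDfsA d f dup v g).1 (pvDfsA d f dup v g).2 := by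
        simp [pvDfsListA, h]
      rw [e]
      have step := hdfs dup v g (rest.filterMap (fun l => PySem.List.pyGet? l 0) ++ s) h1 (Or.inl hdup)
      have hmono := (pvDfs_mono d f).1 dup v g
      calc pvStackLoop d ((n :: rest).filterMap (fun l => PySem.List.pyGet? l 0) ++ s) v g
          = pvStackLoop d (dup :: (rest.filterMap (fun l => PySem.List.pyGet? l 0) ++ s)) v g := by
            simp [h]
        _ = pvStackLoop d (rest.filterMap (fun l => PySem.List.pyGet? l 0) ++ s)
              (pvDfsA d f dup v g).1 (pvDfsA d f dup v g).2 := step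
        _ = _ := ih _ _ s (le_trans hmono h1) (fun l hl => h2 l (List.mem_cons_of_mem _ hl))

-- the simulation, node form: popping one node equals one call of A's dfs
theorem pvSim_dfs (d : PySem.Dict String (List (List String))) :
    ∀ f image v g s, pvUnvisited d v ≤ f → (image ∈ pvNodes d ∨ pvUnvisited d v < f) →
      pvStackLoop d (image :: s) v g
        = pvStackLoop d s (pvDfsA d f image v g).1 (pvDfsA d f image v g).2 := by
  intro f
  induction f with
  | zero =>
    intro image v g s h1 h2
    have himg : image ∈ pvNodes d := by
      rcases h2 with h2 | h2
      · exact h2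
      · omega
    have hmem : image ∈ v := by
      have h0 : pvUnvisited d v = 0 := Nat.le_zero.mp h1
      have hnil : (pvNodes d).filter (fun x => !(v.contains x)) = [] :=
        List.length_eq_zero_iff.mp h0
      have := List.filter_eq_nil_iff.mp hnil image himg
      exact (PySem.Set.contains_iff v image).mp (by simpa using this)
    simp [pvStackLoop, pvDfsA, hmem]
  | succ f ihf =>
    intro image v g s h1 h2
    have hlist := pvSim_list d f (fun i v g s ha hb => ihf i v g s ha hb)
    by_cases hv : image ∈ v
    · simp [pvStackLoop, pvDfsA, hv]
    · have eA : pvDfsA d (f + 1) image v g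
          = pvDfsListA d f (d.getD image []) (PySem.Set.add v image) (PySem.Set.add g image) := by
        simp [pvDfsA, hv]
      have eB : pvStackLoop d (image :: s) v g
          = pvStackLoop d
              (((d.getD image []).reverse.filterMap (fun l => PySem.List.pyGet? l 0)).foldl
                (fun st x => x :: st) s)
              (PySem.Set.add v image) (PySem.Set.add g image) := by
        simp [pvStackLoop, hv]
      have epush :
          ((d.getD image []).reverse.filterMap (fun l => PySem.List.pyGet? l 0)).foldl
              (fun st x => x :: st) s
            = (d.getD image []).filterMap (fun l => PySem.List.pyGet? l 0) ++ s := by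
        rw [pvPush_eq, List.filterMap_reverse, List.reverse_reverse]
      have h1' : pvUnvisited d (PySem.Set.add v image) ≤ f := by
        by_cases hn : image ∈ pvNodes d
        · have := pvUnvisited_add_lt d v image hn hv
          omega
        · have heq := pvUnvisited_add_eq d v image hn
          rcases h2 with h2 | h2
          · exact absurd h2 hn
          · omega
      rw [eA, eB, epush]
      exact hlist (d.getD image []) (PySem.Set.add v image) (PySem.Set.add g image) s h1'
        (fun l hl dup hdup => pvHead_mem_nodes d image l hl dup hdup)

-- one whole component: B's stack loop started on [image] is A's dfs with the canonical fuel
theorem pvSim_single (d : PySem.Dict String (List (List String))) (image : String)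
    (v g : PySem.Set String) :
    pvStackLoop d [image] v g = pvDfsA d ((pvNodes d).length + 1) image v g := by
  have hle : pvUnvisited d v ≤ (pvNodes d).length := List.length_filter_le _ _
  have h := pvSim_dfs d ((pvNodes d).length + 1) image v g [] (by omega) (Or.inr (by omega))
  rw [h]
  simp [pvStackLoop]

-- ===== VERDICT (by name: the statement is the Claim_ definition above) =====
theorem group_images_spec : Claim_equal_group_images := by
  intro duplicates _ _
  have hfg : (fun (st : PySem.Set String × List (List String)) (image : String) =>
      if st.1.contains image = true then st
      else
        let r := pvDfsA (pvDict duplicates) ((pvNodes (pvDict duplicates)).length + 1) image st.1 PySem.Set.empty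
        (r.1, st.2 ++ [PySem.List.sorted r.2 (fun x => x) false]))
    = (fun (st : PySem.Set String × List (List String)) (image : String) =>
      if st.1.contains image = true then st
      else
        let r := pvStackLoop (pvDict duplicates) [image] st.1 PySem.Set.empty
        (r.1, st.2 ++ [PySem.List.sorted r.2 (fun x => x) false])) := by
    funext st image
    by_cases hm : image ∈ st.1
    · simp [hm]
    · simp only [pvContains_eq, hm, decide_false, Bool.false_eq_true, if_false]
      rw [pvSim_single]
  show group_images duplicates = group_images_alt duplicates
  show (List.foldl
      (fun (st : PySem.Set String × List (List String)) (image : String) =>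
        if st.1.contains image = true then st
        else
          let r := pvDfsA (pvDict duplicates) ((pvNodes (pvDict duplicates)).length + 1) image st.1 PySem.Set.empty
          (r.1, st.2 ++ [PySem.List.sorted r.2 (fun x => x) false]))
      (PySem.Set.empty, []) (pvDict duplicates).keys).2
    = (List.foldl
      (fun (st : PySem.Set String × List (List String)) (image : String) =>
        if st.1.contains image = true then st
        else
          let r := pvStackLoop (pvDict duplicates) [image] st.1 PySem.Set.empty
          (r.1, st.2 ++ [PySem.List.sorted r.2 (fun x => x) false]))
      (PySem.Set.empty, []) (pvDict duplicates).keys).2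
  rw [hfg]
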